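-- pv_equiv track=rewrite | github.com/andcarnivorous/flask-shorten-url | utils.py | check_shortcode
-- ===== SOURCE A (Python) =====
-- import string
--
-- def check_shortcode(shortcode: str) -> bool:
--     """
--     Check whether a shortcode is only alphanumeric and 6 characters long.
--     :param shortcode: shortcode to check
--     :return: True if the shortcode is ok
--     """
--
--     standard = string.digits+string.ascii_letters+"_"
--
--     if len(shortcode) != 6:
--         return False
--
--     for x in shortcode:
--         if x not in standard:
--             return False
--
--     return True
-- ===== SOURCE B (Python) =====
-- def check_shortcode(shortcode: str) -> bool:
--     """
--     Check whether a shortcode is only alphanumeric and 6 characters long.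
--     :param shortcode: shortcode to check
--     :return: True if the shortcode is ok
--     """
--     # Single-pass DFA: state counts valid chars seen (0..6), -1 is the dead state.
--     # Accept exactly when the run ends in state 6; no separate length check.
--     state = 0
--     for c in shortcode:
--         if state < 0 or state >= 6 or not (
--             c == "_" or "0" <= c <= "9" or "a" <= c <= "z" or "A" <= c <= "Z"
--         ):
--             state = -1
--         else:
--             state += 1
--     return state == 6
-- ===== Notes on version B (the rewrite author's own statement) =====
-- stated objective: alternative
-- what changed: Replaces A's separate length guard plus early-return membership loop over a built 63-char alphabet string with a single-pass deterministic finite automaton: a counter state (0..6, with -1 dead) advanced per character by range comparisons, accepting iff the run ends in state 6, so there is no len() call and no alphabet string.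
import Mathlib
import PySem

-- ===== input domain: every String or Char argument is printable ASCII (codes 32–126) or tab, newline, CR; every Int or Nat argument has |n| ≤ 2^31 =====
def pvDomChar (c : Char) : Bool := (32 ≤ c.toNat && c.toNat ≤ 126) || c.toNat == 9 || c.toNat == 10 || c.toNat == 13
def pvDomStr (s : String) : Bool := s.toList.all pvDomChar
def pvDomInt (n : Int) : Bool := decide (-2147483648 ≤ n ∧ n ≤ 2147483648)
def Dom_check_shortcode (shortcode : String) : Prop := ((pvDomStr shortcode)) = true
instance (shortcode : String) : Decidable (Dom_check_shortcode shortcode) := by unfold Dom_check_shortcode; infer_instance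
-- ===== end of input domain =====

set_option maxRecDepth 8000

-- B replaces A's length guard plus alphabet-string membership loop with a single-pass
-- counter DFA (state 0..6, -1 dead) accepting iff the run ends in state 6 (alternative).


-- ===== PORT A =====
-- string.digits + string.ascii_letters + "_"
def pvStandard : List Char :=
  "0123456789abcdefghijklmnopqrstuvwxyzABCDEFGHIJKLMNOPQRSTUVWXYZ_".toList

-- the `for x in shortcode: if x not in standard: return False` loop
def checkLoopA : List Char → Bool
  | [] => true
  | x :: rest => if !(pvStandard.contains x) then false else checkLoopA rest

def check_shortcode (shortcode : String) : Bool :=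
  if PySem.Str.len shortcode ≠ 6 then false
  else checkLoopA shortcode.toList

-- ===== PORT B =====
-- c == '_' or '0' <= c <= '9' or 'a' <= c <= 'z' or 'A' <= c <= 'Z'
def pvValidB (c : Char) : Bool :=
  c == '_' || ('0' ≤ c && c ≤ '9') || ('a' ≤ c && c ≤ 'z') || ('A' ≤ c && c ≤ 'Z')

-- the DFA transition applied by B's loop
def pvStep (state : Int) (c : Char) : Int :=
  if state < 0 || state ≥ 6 || !(pvValidB c) then -1 else state + 1

def check_shortcode_alt (shortcode : String) : Bool :=
  (shortcode.toList.foldl pvStep 0) == 6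

-- ===== PRECONDITION & SPEC =====
def Spec_check_shortcode (shortcode : String) (out : Bool) : Prop := out = check_shortcode_alt shortcode
instance (shortcode : String) (out : Bool) : Decidable (Spec_check_shortcode shortcode out) := by unfold Spec_check_shortcode; infer_instance

-- ===== CLAIM (what is proved, stated in full; the proofs are below) =====
def Claim_equal_check_shortcode : Prop := ∀ (shortcode : String), Dom_check_shortcode shortcode → Spec_check_shortcode shortcode (check_shortcode shortcode)

-- ===== LEMMAS AND PROOFS =====

-- A's per-character membership test agrees with B's range predicate on every Char
theorem char_class_eq (c : Char) : pvStandard.contains c = pvValidB c := by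
  by_cases hn : c.toNat < 128
  · obtain ⟨n, hn128, rfl⟩ : ∃ n, n < 128 ∧ c = Char.ofNat n :=
      ⟨c.toNat, hn, (Char.ofNat_toNat c).symm⟩
    interval_cases n <;> decide
  · have hall : pvStandard.all (fun x => decide (x.toNat < 128)) = true := by rfl
    have hmem : ∀ x ∈ pvStandard, x.toNat < 128 := by
      intro x hx
      simpa using List.all_eq_true.mp hall x hx
    have h1 : pvStandard.contains c = false := by
      by_contra h
      rw [Bool.not_eq_false, List.contains_iff_mem] at h
      exact hn (hmem c h)
    have h2 : pvValidB c = false := by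
      unfold pvValidB
      have hle : ∀ d : Char, c ≤ d → d.toNat < 128 → False := fun d h hd =>
        hn (lt_of_le_of_lt (Char.le_def.mp h) hd)
      have e1 : (c == '_') = false := by
        by_contra h; rw [Bool.not_eq_false, beq_iff_eq] at h
        subst h; exact hn (by decide)
      have e2 : ¬ c ≤ '9' := fun h => hle '9' h (by decide)
      have e3 : ¬ c ≤ 'z' := fun h => hle 'z' h (by decide)
      have e4 : ¬ c ≤ 'Z' := fun h => hle 'Z' h (by decide)
      simp [e1, e2, e3, e4]
    rw [h1, h2]

-- the dead state is absorbing
theorem foldl_dead (l : List Char) : l.foldl pvStep (-1) = -1 := by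
  induction l with
  | nil => rfl
  | cons x rest ih => simpa [pvStep] using ih

-- running the DFA from a live state s: ends at s + |l| if that stays ≤ 6 and all chars are valid, else dead
theorem foldl_live (l : List Char) (s : Int) (h0 : 0 ≤ s) (h6 : s ≤ 6) :
    l.foldl pvStep s =
      if (s + l.length ≤ 6 ∧ l.all pvValidB) then s + l.length else -1 := by
  induction l generalizing s with
  | nil => simp [h6]
  | cons x rest ih =>
      simp only [List.foldl_cons, List.all_cons, List.length_cons]
      by_cases hv : pvValidB x
      · by_cases hs : s = 6
        · subst hs
          have : pvStep 6 x = -1 := by simp [pvStep]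
          rw [this, foldl_dead]
          rw [if_neg]
          rintro ⟨h, -⟩
          push_cast at h
          omega
        · have hs6 : s < 6 := lt_of_le_of_ne h6 hs
          have hstep : pvStep s x = s + 1 := by
            simp [pvStep, hv, not_lt.mpr h0, not_le.mpr hs6]
          rw [hstep, ih (s + 1) (by omega) (by omega)]
          simp only [hv, Bool.true_and]
          push_cast
          ring_nf
      · have hstep : pvStep s x = -1 := by simp [pvStep, hv]
        rw [hstep, foldl_dead]
        rw [if_neg]
        rintro ⟨-, h⟩
        exact hv (Bool.and_elim_left h)

-- A's early-return loop is `all` over the membership predicate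
theorem loopA_eq_all (l : List Char) : checkLoopA l = l.all pvValidB := by
  induction l with
  | nil => rfl
  | cons x rest ih =>
      rw [checkLoopA, List.all_cons, ← char_class_eq, ih]
      cases h : pvStandard.contains x <;> simp

-- ===== VERDICT (by name: the statement is the Claim_ definition above) =====
theorem check_shortcode_spec : Claim_equal_check_shortcode := by
  intro s _
  unfold Spec_check_shortcode check_shortcode check_shortcode_alt
  rw [foldl_live s.toList 0 (by norm_num) (by norm_num), loopA_eq_all]
  have hlen : PySem.Str.len s = (s.toList.length : Int) := by
    simp [PySem.Str.len]
  by_cases hL : s.toList.length = 6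
  · by_cases hall : s.toList.all pvValidB
    · simp [hL, hall]
    · simp [hL, hall]
  · have h1 : PySem.Str.len s ≠ 6 := by rw [hlen]; exact_mod_cast fun h => hL (by exact_mod_cast h)
    rw [if_pos h1]
    split
    · symm
      rw [beq_eq_false_iff_ne]
      intro h
      omega
    · rfl
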